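-- pv_equiv track=rewrite | github.com/mouredev/retos-programacion-2023 | Retos/Reto #28 - EXPRESIÓN MATEMÁTICA [Media]/python/ingjavierpinilla.py | verify_expression
-- ===== SOURCE A (Python) =====
-- SUPPORTED_OPERATIONS = "+-*/%"
--
-- def verify_expression(operation: str) -> bool:
--     operation_lst = operation.split()
--     if len(operation_lst) % 2 == 0:
--         return False
--     for i, v in enumerate(operation_lst):
--         if i % 2 == 0:
--             try:
--                 int(v)
--             except:
--                 return False
--         else:
--             if v not in SUPPORTED_OPERATIONS:
--                 return False
--     return True
-- ===== SOURCE B (Python) =====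
-- SUPPORTED_OPERATIONS = "+-*/%"
--
--
-- def _is_int(v):
--     try:
--         int(v)
--         return True
--     except ValueError:
--         return False
--
--
-- def _ok(ts):
--     # grammar: expr := NUMBER (OP NUMBER)*
--     if len(ts) == 1:
--         return _is_int(ts[0])
--     if len(ts) < 3:
--         return False
--     return _is_int(ts[0]) and ts[1] in SUPPORTED_OPERATIONS and _ok(ts[2:])
--
--
-- def verify_expression(operation: str) -> bool:
--     return _ok(operation.split())
-- ===== Notes on version B (the rewrite author's own statement) =====
-- stated objective: simpler
-- what changed: Replaces the indexed loop with a parity test and an up-front even-length rejection by a recursive-descent check of the grammar NUMBER (OP NUMBER)* that consumes two tokens per step; the length-parity check disappears because the grammar enforces it.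
import Mathlib
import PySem

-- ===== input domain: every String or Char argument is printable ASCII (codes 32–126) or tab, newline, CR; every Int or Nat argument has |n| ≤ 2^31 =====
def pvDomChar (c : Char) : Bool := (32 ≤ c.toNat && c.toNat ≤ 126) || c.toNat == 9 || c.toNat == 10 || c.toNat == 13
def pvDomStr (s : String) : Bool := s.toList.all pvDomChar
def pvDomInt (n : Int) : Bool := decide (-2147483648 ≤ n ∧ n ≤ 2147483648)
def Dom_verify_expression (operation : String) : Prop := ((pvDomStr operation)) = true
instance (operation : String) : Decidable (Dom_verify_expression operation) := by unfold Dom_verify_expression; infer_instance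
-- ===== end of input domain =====

-- B replaces A's indexed loop (parity test on the index, up-front even-length rejection) by a
-- recursive-descent check of the grammar NUMBER (OP NUMBER)* consuming two tokens per step; simpler.

-- ===== PORT A =====
-- the for-loop over enumerate(operation_lst) with its early returns
def loopA : List (Int × String) → Bool
  | [] => true
  | (i, v) :: rest =>
    if PySem.Int.mod i 2 = 0 then
      match PySem.Int.ofStr? v with
      | none => false
      | some _ => loopA rest
    else
      if !(PySem.Str.isIn v "+-*/%") then false else loopA rest

def verify_expression (operation : String) : Bool :=
  let operation_lst := PySem.Str.split₀ operation
  if PySem.Int.mod (operation_lst.length : Int) 2 = 0 then false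
  else loopA (PySem.List.enumerate operation_lst)

-- ===== PORT B =====
def pyIsInt (v : String) : Bool := (PySem.Int.ofStr? v).isSome

-- _ok: grammar NUMBER (OP NUMBER)*
def okB : List String → Bool
  | [v] => pyIsInt v
  | v :: op :: r :: rest => pyIsInt v && PySem.Str.isIn op "+-*/%" && okB (r :: rest)
  | _ => false

def verify_expression_alt (operation : String) : Bool :=
  okB (PySem.Str.split₀ operation)

-- ===== PRECONDITION & SPEC =====
def Spec_verify_expression (operation : String) (out : Bool) : Prop := out = verify_expression_alt operation
instance (operation : String) (out : Bool) : Decidable (Spec_verify_expression operation out) := by unfold Spec_verify_expression; infer_instance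

-- ===== CLAIM (what is proved, stated in full; the proofs are below) =====
def Claim_equal_verify_expression : Prop := ∀ (operation : String), Dom_verify_expression operation → Spec_verify_expression operation (verify_expression operation)

-- ===== LEMMAS AND PROOFS =====

-- A's loop body, with the index parity resolved structurally (proof helper)
def loopEO : List String → Bool
  | [] => true
  | [v] => pyIsInt v
  | v :: op :: rest => pyIsInt v && PySem.Str.isIn op "+-*/%" && loopEO rest

lemma loopA_enum (l : List String) : ∀ i : Int, PySem.Int.mod i 2 = 0 →
    loopA (PySem.List.enumerate l i) = loopEO l := by
  induction l using loopEO.induct with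
  | case1 =>
    intro i _; simp [PySem.List.enumerate_nil, loopA, loopEO]
  | case2 v =>
    intro i hi
    simp only [PySem.List.enumerate_cons, PySem.List.enumerate_nil, loopA, loopEO, hi, if_pos]
    cases h : PySem.Int.ofStr? v <;> simp [h, pyIsInt, loopA]
  | case3 v op rest ih =>
    intro i hi
    have h1 : ¬ PySem.Int.mod (i + 1) 2 = 0 := by
      rw [PySem.Int.mod_eq_emod_of_pos (by norm_num)] at hi ⊢; omega
    have h2 : PySem.Int.mod (i + 1 + 1) 2 = 0 := by
      rw [PySem.Int.mod_eq_emod_of_pos (by norm_num)] at hi ⊢; omega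
    simp only [PySem.List.enumerate_cons, loopA, loopEO, hi, if_pos, h1, if_neg]
    cases h : PySem.Int.ofStr? v
    · simp [pyIsInt, h]
    · simp only [pyIsInt, h, Option.isSome_some, Bool.true_and]
      cases hop : PySem.Str.isIn op "+-*/%"
      · simp
      · simp [ih (i + 1 + 1) h2]

lemma ifmod_loopEO_eq_okB (l : List String) :
    (if PySem.Int.mod (l.length : Int) 2 = 0 then false else loopEO l) = okB l := by
  induction l using okB.induct with
  | case1 v => simp [loopEO, okB, PySem.Int.mod]
  | case2 v op r rest ih =>
    have hlen : ((v :: op :: r :: rest).length : Int) = ((r :: rest).length : Int) + 2 := by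
      simp; omega
    rw [hlen]
    have hpar : (PySem.Int.mod (((r :: rest).length : Int) + 2) 2 = 0) ↔
        (PySem.Int.mod ((r :: rest).length : Int) 2 = 0) := by
      rw [PySem.Int.mod_eq_emod_of_pos (by norm_num),
          PySem.Int.mod_eq_emod_of_pos (by norm_num)]
      omega
    by_cases h : PySem.Int.mod ((r :: rest).length : Int) 2 = 0
    · rw [if_pos (hpar.mpr h)]
      rw [if_pos h] at ih
      simp [okB, ← ih]
    · rw [if_neg (fun hc => h (hpar.mp hc))]
      rw [if_neg h] at ih
      simp [loopEO, okB, ← ih]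
  | case3 l h1 h2 =>
    cases l with
    | nil => simp [okB, PySem.Int.mod]
    | cons a t =>
      cases t with
      | nil => exact absurd rfl (h1 a)
      | cons b t2 =>
        cases t2 with
        | nil => simp [okB, PySem.Int.mod]
        | cons c t3 => exact absurd rfl (h2 a b c t3)

-- ===== VERDICT (by name: the statement is the Claim_ definition above) =====
theorem verify_expression_spec : Claim_equal_verify_expression := by
  intro op _
  unfold Spec_verify_expression verify_expression verify_expression_alt
  show (if PySem.Int.mod ((PySem.Str.split₀ op).length : Int) 2 = 0 then false
        else loopA (PySem.List.enumerate (PySem.Str.split₀ op))) = okB (PySem.Str.split₀ op)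
  rw [loopA_enum _ 0 (by decide)]
  exact ifmod_loopEO_eq_okB _
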